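-- pv_equiv track=rewrite | github.com/1049409723/bilibiliCacheVideosConvert | videosConverter.py | checkSubDirs
-- ===== SOURCE A (Python) =====
-- def checkSubDirs(dirs):
--     if len(dirs) == 0:
--         return False
--     else:
--         numOfDirs = 0
--         for ele in dirs:
--             if ele.isdigit():
--                 numOfDirs += 1
--             else:
--                 numOfDirs -= 1
--         if numOfDirs == len(dirs):
--             return True
--         else:
--             return False
-- ===== SOURCE B (Python) =====
-- def checkSubDirs(dirs):
--     return len(dirs) > 0 and all(d.isdigit() for d in dirs)
-- ===== Notes on version B (the rewrite author's own statement) =====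
-- stated objective: idiomatic
-- what changed: Replaced the +1/-1 counter accumulated over the whole list and compared to len(dirs) with a short-circuiting non-empty guard plus all(d.isdigit()).
import Mathlib
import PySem

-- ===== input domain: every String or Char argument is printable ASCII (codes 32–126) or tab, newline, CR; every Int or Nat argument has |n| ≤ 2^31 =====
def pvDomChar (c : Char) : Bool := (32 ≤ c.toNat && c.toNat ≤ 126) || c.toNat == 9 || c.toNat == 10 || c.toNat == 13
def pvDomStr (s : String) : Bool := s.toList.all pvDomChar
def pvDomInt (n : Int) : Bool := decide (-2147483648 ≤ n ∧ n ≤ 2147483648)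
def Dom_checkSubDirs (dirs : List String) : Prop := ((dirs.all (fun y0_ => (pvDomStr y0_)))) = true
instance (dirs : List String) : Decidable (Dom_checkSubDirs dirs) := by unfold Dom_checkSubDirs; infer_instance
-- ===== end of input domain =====

-- B replaces A's +1/-1 counter compared against len(dirs) with a non-empty guard plus a short-circuiting all-isdigit pass (idiomatic).

-- ===== PORT A =====
def checkSubDirs (dirs : List String) : Bool :=
  if dirs.length == 0 then false
  else
    let numOfDirs : Int :=
      dirs.foldl (fun n ele => if PySem.Str.strIsdigit ele then n + 1 else n - 1) 0
    if numOfDirs == (dirs.length : Int) then true else false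

-- ===== PORT B =====
def checkSubDirs_alt (dirs : List String) : Bool :=
  decide (dirs.length > 0) && dirs.all (fun d => PySem.Str.strIsdigit d)

-- ===== PRECONDITION & SPEC =====
def Spec_checkSubDirs (dirs : List String) (out : Bool) : Prop := out = checkSubDirs_alt dirs
instance (dirs : List String) (out : Bool) : Decidable (Spec_checkSubDirs dirs out) := by unfold Spec_checkSubDirs; infer_instance

-- ===== CLAIM (what is proved, stated in full; the proofs are below) =====
def Claim_equal_checkSubDirs : Prop := ∀ (dirs : List String), Dom_checkSubDirs dirs → Spec_checkSubDirs dirs (checkSubDirs dirs)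

-- ===== LEMMAS AND PROOFS =====

-- The counter starting from n is at most n + length, with equality iff every element is a digit.
theorem pv_counter_le (dirs : List String) (n : Int) :
    dirs.foldl (fun n ele => if PySem.Str.strIsdigit ele then n + 1 else n - 1) n
      ≤ n + (dirs.length : Int) ∧
    (dirs.foldl (fun n ele => if PySem.Str.strIsdigit ele then n + 1 else n - 1) n
      = n + (dirs.length : Int) ↔ dirs.all (fun d => PySem.Str.strIsdigit d) = true) := by
  induction dirs generalizing n with
  | nil => simp
  | cons h t ih =>
    rw [List.foldl_cons, List.all_cons]
    simp only [List.length_cons]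
    push_cast
    cases hd : PySem.Str.strIsdigit h with
    | true =>
      rw [if_pos rfl]
      obtain ⟨hle, hiff⟩ := ih (n + 1)
      refine ⟨by omega, ?_⟩
      rw [Bool.true_and]
      constructor
      · intro he; exact hiff.mp (by omega)
      · intro ht; have := hiff.mpr ht; omega
    | false =>
      rw [if_neg (by decide)]
      obtain ⟨hle, hiff⟩ := ih (n - 1)
      refine ⟨by omega, ?_⟩
      rw [Bool.false_and]
      simp only [Bool.false_eq_true, iff_false]
      intro he
      omega

-- ===== VERDICT (by name: the statement is the Claim_ definition above) =====
theorem checkSubDirs_spec : Claim_equal_checkSubDirs := by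
  intro dirs _
  show checkSubDirs dirs = checkSubDirs_alt dirs
  obtain ⟨-, hiff⟩ := pv_counter_le dirs 0
  rw [zero_add] at hiff
  cases dirs with
  | nil => rfl
  | cons h t =>
    simp only [checkSubDirs, checkSubDirs_alt]
    rw [if_neg (by simp)]
    rw [show decide ((h :: t).length > 0) = true by simp, Bool.true_and]
    cases hall : (h :: t).all (fun d => PySem.Str.strIsdigit d) with
    | true => rw [if_pos (by simpa using hiff.mpr hall)]
    | false =>
      rw [if_neg]
      simp only [beq_iff_eq]
      intro he
      rw [hiff.mp he] at hall
      exact absurd hall (by simp)
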